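-- pv_equiv track=rewrite | github.com/lucasrct/app | utils/formatters.py | format_file_path
-- ===== SOURCE A (Python) =====
-- def format_file_path(path: str, max_length: int = 60) -> str:
--     """Shorten file path for display, keeping the meaningful suffix."""
--     if len(path) <= max_length:
--         return path
--
--     parts = path.split("/")
--     for i in range(len(parts)):
--         shortened = "/".join(["..."] + parts[i:])
--         if len(shortened) <= max_length:
--             return shortened
--
--     return "..." + path[-(max_length - 3):]
-- ===== SOURCE B (Python) =====
-- def format_file_path(path: str, max_length: int = 60) -> str:
--     """Shorten file path for display, keeping the meaningful suffix."""
--     if len(path) <= max_length: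
--         return path
--     acc = ""
--     kept = False
--     for part in reversed(path.split("/")):
--         cand = "/" + part + acc
--         if 3 + len(cand) > max_length:
--             break
--         acc = cand
--         kept = True
--     if kept:
--         return "..." + acc
--     return "..." + path[-(max_length - 3):]
-- ===== Notes on version B (the rewrite author's own statement) =====
-- stated objective: alternative
-- what changed: Replaces A's left-to-right scan that re-joins and measures every candidate suffix with a single right-to-left greedy pass that grows the kept suffix string incrementally and breaks at the first part that no longer fits (valid because the joined length is strictly monotone in the number of kept parts).
import Mathlib
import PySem

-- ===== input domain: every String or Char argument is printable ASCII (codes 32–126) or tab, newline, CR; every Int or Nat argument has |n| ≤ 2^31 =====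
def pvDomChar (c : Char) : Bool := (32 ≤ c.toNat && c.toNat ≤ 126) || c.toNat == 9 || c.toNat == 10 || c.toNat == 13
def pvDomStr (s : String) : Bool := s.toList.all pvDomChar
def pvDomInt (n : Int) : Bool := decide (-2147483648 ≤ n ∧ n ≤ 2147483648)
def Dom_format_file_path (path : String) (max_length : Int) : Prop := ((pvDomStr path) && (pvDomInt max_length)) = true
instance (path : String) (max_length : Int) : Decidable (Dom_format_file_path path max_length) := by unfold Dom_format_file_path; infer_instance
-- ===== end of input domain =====

-- B replaces A's left-to-right rejoin-and-measure scan with one right-to-left greedy pass that grows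
-- the kept suffix incrementally and stops at the first part that no longer fits (objective: alternative).

-- ===== PORT A =====
-- A's 'for i in range(len(parts))' loop: at step i the remaining suffix parts[i:] is the argument;
-- it joins "/"-separated ['...'] + parts[i:] and returns the first short-enough join, none = fell through.
def pvALoop (ml : Int) : List (List Char) → Option (List Char)
  | [] => none
  | p :: t =>
      let s := PySem.Chars.join ['/'] (['.', '.', '.'] :: p :: t)
      if (s.length : Int) ≤ ml then some s else pvALoop ml t

def format_file_path (path : String) (max_length : Int) : String :=
  let cs := path.toList
  if (cs.length : Int) ≤ max_length then path
  else
    let parts := PySem.Chars.splitOn cs ['/']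
    match pvALoop max_length parts with
    | some s => String.ofList s
    | none => String.ofList (['.', '.', '.'] ++ PySem.List.slice cs (some (-(max_length - 3))) none)

-- ===== PORT B =====
-- B's 'for part in reversed(parts)' loop with break: state (acc, kept); cand = '/' + part + acc;
-- break when 3 + len(cand) > max_length, else keep extending.
def pvGreedy (ml : Int) : List (List Char) → List Char → Bool → List Char × Bool
  | [], acc, kept => (acc, kept)
  | part :: rest, acc, kept =>
      let cand := '/' :: part ++ acc
      if 3 + (cand.length : Int) > ml then (acc, kept)
      else pvGreedy ml rest cand true

def format_file_path_alt (path : String) (max_length : Int) : String :=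
  let cs := path.toList
  if (cs.length : Int) ≤ max_length then path
  else
    let r := pvGreedy max_length (PySem.Chars.splitOn cs ['/']).reverse [] false
    if r.2 then String.ofList ('.' :: '.' :: '.' :: r.1)
    else String.ofList (['.', '.', '.'] ++ PySem.List.slice cs (some (-(max_length - 3))) none)

-- ===== PRECONDITION & SPEC =====
def Spec_format_file_path (path : String) (max_length : Int) (out : String) : Prop := out = format_file_path_alt path max_length
instance (path : String) (max_length : Int) (out : String) : Decidable (Spec_format_file_path path max_length out) := by unfold Spec_format_file_path; infer_instance

-- ===== CLAIM (what is proved, stated in full; the proofs are below) =====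
def Claim_equal_format_file_path : Prop := ∀ (path : String) (max_length : Int), Dom_format_file_path path max_length → Spec_format_file_path path max_length (format_file_path path max_length)

-- ===== LEMMAS AND PROOFS =====

-- the '/'-prefixed rendering of a kept suffix: B's accumulator after keeping exactly these parts
def pvAcc (l : List (List Char)) : List Char := l.foldr (fun p r => '/' :: p ++ r) []

theorem pvAcc_cons (a : List Char) (l : List (List Char)) :
    pvAcc (a :: l) = '/' :: a ++ pvAcc l := rfl

theorem pvAcc_len_cons (a : List Char) (l : List (List Char)) :
    (pvAcc (a :: l)).length = 1 + a.length + (pvAcc l).length := by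
  rw [pvAcc_cons]; simp; omega

theorem pvALoop_cons (ml : Int) (p : List Char) (t : List (List Char)) :
    pvALoop ml (p :: t) =
      (if ((PySem.Chars.join ['/'] (['.', '.', '.'] :: p :: t)).length : Int) ≤ ml
       then some (PySem.Chars.join ['/'] (['.', '.', '.'] :: p :: t)) else pvALoop ml t) := rfl

theorem pvGreedy_cons (ml : Int) (p : List Char) (rest : List (List Char)) (acc : List Char) (kept : Bool) :
    pvGreedy ml (p :: rest) acc kept =
      (if 3 + ((('/' :: p ++ acc).length : Int)) > ml then (acc, kept)
       else pvGreedy ml rest ('/' :: p ++ acc) true) := rfl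

theorem pvJoinAcc (t : List (List Char)) (p : List Char) :
    PySem.Chars.join ['/'] (p :: t) = p ++ pvAcc t := by
  induction t generalizing p with
  | nil => rw [PySem.Chars.join_singleton]; simp [pvAcc]
  | cons q u ih =>
      rw [PySem.Chars.join_cons_cons, ih q, pvAcc_cons]
      simp

theorem pvJoinDots (s : List (List Char)) :
    PySem.Chars.join ['/'] (['.', '.', '.'] :: s) = ['.', '.', '.'] ++ pvAcc s := by
  cases s with
  | nil => rw [PySem.Chars.join_singleton]; simp [pvAcc]
  | cons p t =>
      rw [PySem.Chars.join_cons_cons, pvJoinAcc t p, pvAcc_cons]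
      simp

theorem pvJoinDots_len (s : List (List Char)) :
    ((PySem.Chars.join ['/'] (['.', '.', '.'] :: s)).length : Int) = 3 + (pvAcc s).length := by
  rw [pvJoinDots]; simp; omega

-- prepending parts can only lengthen the rendered suffix
theorem pvAcc_len_mono (q l : List (List Char)) : (pvAcc l).length ≤ (pvAcc (q ++ l)).length := by
  induction q with
  | nil => simp
  | cons a q ih =>
      rw [List.cons_append, pvAcc_len_cons]
      omega

-- if a suffix already fails to fit, A's scan skips every longer suffix
theorem pvALoop_skip (ml : Int) (q : List (List Char)) (x : List Char) (p : List (List Char))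
    (h : ¬ (3 + ((pvAcc (x :: p)).length : Int) ≤ ml)) :
    pvALoop ml (q ++ x :: p) = pvALoop ml (x :: p) := by
  induction q with
  | nil => rfl
  | cons a q ih =>
      rw [List.cons_append, pvALoop_cons, if_neg, ih]
      have hmono := pvAcc_len_mono (a :: q) (x :: p)
      rw [List.cons_append] at hmono
      rw [pvJoinDots_len]
      omega

-- the greedy right-to-left pass computes exactly the answer of A's left-to-right scan
theorem pvMain (ml : Int) (r s : List (List Char))
    (hinv : s = [] ∨ 3 + ((pvAcc s).length : Int) ≤ ml) :
    pvALoop ml (r.reverse ++ s) =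
      (if (pvGreedy ml r (pvAcc s) (!s.isEmpty)).2
       then some (['.', '.', '.'] ++ (pvGreedy ml r (pvAcc s) (!s.isEmpty)).1) else none) := by
  induction r generalizing s with
  | nil =>
      cases s with
      | nil => simp [pvALoop, pvGreedy]
      | cons p t =>
          have hfit : 3 + ((pvAcc (p :: t)).length : Int) ≤ ml := by
            rcases hinv with h | h
            · exact absurd h (by simp)
            · exact h
          rw [List.reverse_nil, List.nil_append, pvALoop_cons,
            if_pos (by rw [pvJoinDots_len]; exact hfit), pvJoinDots]
          simp [pvGreedy]
  | cons x r ih =>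
      have hlist : (x :: r).reverse ++ s = r.reverse ++ x :: s := by
        rw [List.reverse_cons, List.append_assoc]; rfl
      rw [hlist, pvGreedy_cons]
      have hcand : ('/' :: x ++ pvAcc s) = pvAcc (x :: s) := rfl
      rw [hcand]
      by_cases hfit : 3 + (((pvAcc (x :: s)).length : Int)) > ml
      · -- x does not fit: greedy stops; every longer suffix fails too, so A falls back to s
        rw [if_pos hfit, pvALoop_skip ml r.reverse x s (by omega), pvALoop_cons,
          if_neg (by rw [pvJoinDots_len]; omega)]
        cases s with
        | nil => simp [pvALoop]
        | cons p t =>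
            have hfits : 3 + ((pvAcc (p :: t)).length : Int) ≤ ml := by
              rcases hinv with h | h
              · exact absurd h (by simp)
              · exact h
            rw [pvALoop_cons, if_pos (by rw [pvJoinDots_len]; exact hfits), pvJoinDots]
            simp
      · -- x fits: greedy keeps it and recurses on the regrouped list
        rw [if_neg hfit]
        have := ih (x :: s) (Or.inr (by omega))
        simpa using this

-- ===== VERDICT (by name: the statement is the Claim_ definition above) =====
theorem format_file_path_spec : Claim_equal_format_file_path := by
  intro path max_length _
  show format_file_path path max_length = format_file_path_alt path max_length
  simp only [format_file_path, format_file_path_alt]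
  by_cases h : ((path.toList.length : Int) ≤ max_length)
  · rw [if_pos h, if_pos h]
  · rw [if_neg h, if_neg h]
    have hm := pvMain max_length (PySem.Chars.splitOn path.toList ['/']).reverse []
      (Or.inl rfl)
    rw [List.reverse_reverse, List.append_nil] at hm
    simp only [pvAcc, List.foldr_nil, List.isEmpty_nil, Bool.not_true] at hm
    rw [hm]
    cases hg : pvGreedy max_length (PySem.Chars.splitOn path.toList ['/']).reverse [] false with
    | mk acc kept => cases kept <;> simp
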